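-- pv_equiv track=rewrite | github.com/cjbass02/JCI-Hackathon-2024 | src/pipeline.py | filter_first_instance
-- ===== SOURCE A (Python) =====
-- def filter_first_instance(input_dict):
--     unique_values = set()
--     filtered_dict = {}
--
--     for key, value in input_dict.items():
--         if value not in unique_values:
--             unique_values.add(value)
--             filtered_dict[key] = value
--
--     return filtered_dict
-- ===== SOURCE B (Python) =====
-- def filter_first_instance(input_dict):
--     # Reverse pass with unconditional overwrites: after it, `first` maps each value
--     # to the key of its FIRST occurrence (last write in reverse order wins).
--     # Then keep exactly the pairs whose key is that recorded first key.
--     items = list(input_dict.items())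
--     first = {}
--     for k, v in reversed(items):
--         first[v] = k
--     return {k: v for k, v in items if first.get(v) == k}
-- ===== Notes on version B (the rewrite author's own statement) =====
-- stated objective: alternative
-- what changed: Replaces A's forward pass with a membership-tested seen-set and guarded inserts by a reverse pass of unconditional overwrites into a value-to-key map (last write in reverse order = first key per value) followed by a filter that keeps exactly the pairs whose key equals that recorded first key; no set and no membership branch remain.
import Mathlib
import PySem

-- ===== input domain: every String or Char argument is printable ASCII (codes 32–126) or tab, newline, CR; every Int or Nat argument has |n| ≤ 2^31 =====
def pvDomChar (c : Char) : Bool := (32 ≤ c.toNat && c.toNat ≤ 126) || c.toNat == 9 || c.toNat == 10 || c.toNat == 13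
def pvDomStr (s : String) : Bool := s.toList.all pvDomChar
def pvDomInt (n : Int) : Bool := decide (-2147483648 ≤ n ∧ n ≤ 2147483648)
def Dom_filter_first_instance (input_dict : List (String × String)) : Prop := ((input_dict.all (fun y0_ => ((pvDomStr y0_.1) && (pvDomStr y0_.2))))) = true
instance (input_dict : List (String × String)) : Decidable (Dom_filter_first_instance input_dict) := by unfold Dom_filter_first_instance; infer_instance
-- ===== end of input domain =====

-- B replaces A's forward seen-set pass by a reverse pass of unconditional overwrites
-- (last write wins = first key per value) followed by a filter keeping exactly the
-- pairs whose key is that recorded first key (objective: alternative).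

-- ===== PORT A =====
def filter_first_instance (input_dict : List (String × String)) : List (String × String) :=
  ((input_dict.foldl
      (fun (st : PySem.Set String × PySem.Dict String String) kv =>
        if PySem.Set.contains st.1 kv.2 then st
        else (PySem.Set.add st.1 kv.2, st.2.insert kv.1 kv.2))
      (PySem.Set.empty, PySem.Dict.empty)).2).items

-- ===== PORT B =====
def filter_first_instance_alt (input_dict : List (String × String)) : List (String × String) :=
  let items := input_dict
  let first := items.reverse.foldl
      (fun (d : PySem.Dict String String) kv => d.insert kv.2 kv.1) PySem.Dict.empty
  ((items.filter (fun kv => first.get? kv.2 == some kv.1)).foldl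
      (fun (d : PySem.Dict String String) kv => d.insert kv.1 kv.2) PySem.Dict.empty).items

-- ===== PRECONDITION & SPEC =====
-- Pre_ requires the keys of the association list to be distinct: the Python parameter is a
-- dict, whose keys are distinct by construction, so every input the Python A accepts is
-- admitted; a duplicate-key association list represents no Python dict.
def Pre_filter_first_instance (input_dict : List (String × String)) : Prop :=
  (input_dict.map Prod.fst).Nodup
instance (input_dict : List (String × String)) : Decidable (Pre_filter_first_instance input_dict) := by unfold Pre_filter_first_instance; infer_instance
def pvWitness_filter_first_instance : (List (String × String)) := [("a", "x"), ("b", "x"), ("c", "y")]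

def Spec_filter_first_instance (input_dict : List (String × String)) (out : List (String × String)) : Prop := out = filter_first_instance_alt input_dict
instance (input_dict : List (String × String)) (out : List (String × String)) : Decidable (Spec_filter_first_instance input_dict out) := by unfold Spec_filter_first_instance; infer_instance

-- ===== CLAIM (what is proved, stated in full; the proofs are below) =====
def Claim_equal_filter_first_instance : Prop := ∀ (input_dict : List (String × String)), Dom_filter_first_instance input_dict → Pre_filter_first_instance input_dict → Spec_filter_first_instance input_dict (filter_first_instance input_dict)

-- ===== LEMMAS AND PROOFS =====

-- Common reference function: first-occurrence pairs of a list, given the values already seen.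
def ffiGo (seen : List String) : List (String × String) → List (String × String)
  | [] => []
  | kv :: t =>
      if seen.contains kv.2 then ffiGo (seen ++ [kv.2]) t
      else kv :: ffiGo (seen ++ [kv.2]) t

lemma ffiGo_cons (seen : List String) (kv : String × String) (t : List (String × String)) :
    ffiGo seen (kv :: t) = if seen.contains kv.2 then ffiGo (seen ++ [kv.2]) t
      else kv :: ffiGo (seen ++ [kv.2]) t := rfl

-- ffiGo is a sublist of its input (hence its keys inherit Nodup).
lemma ffiGo_sublist (seen : List String) (l : List (String × String)) :
    (ffiGo seen l).Sublist l := by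
  induction l generalizing seen with
  | nil => simp [ffiGo]
  | cons kv t ih =>
      rw [ffiGo_cons]
      split
      · exact (ih _).cons kv
      · exact (ih _).cons₂ kv

-- A-side: the fold's dict items accumulate ffiGo.
lemma a_side (l : List (String × String)) (seen : List String) (S : PySem.Set String)
    (F : PySem.Dict String String)
    (hS : ∀ w, w ∈ S ↔ w ∈ seen)
    (hfresh : ∀ p ∈ l, F.contains p.1 = false)
    (hnd : (l.map Prod.fst).Nodup) :
    ((l.foldl
        (fun (st : PySem.Set String × PySem.Dict String String) kv =>
          if PySem.Set.contains st.1 kv.2 then st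
          else (PySem.Set.add st.1 kv.2, st.2.insert kv.1 kv.2))
        (S, F)).2).items = F.items ++ ffiGo seen l := by
  induction l generalizing seen S F with
  | nil => simp [ffiGo]
  | cons kv t ih =>
      simp only [List.map_cons, List.nodup_cons] at hnd
      simp only [List.foldl_cons]
      by_cases hc : kv.2 ∈ S
      · have hcb : PySem.Set.contains S kv.2 = true := by simp [PySem.Set.contains, hc]
        rw [if_pos hcb,
            ih (seen ++ [kv.2]) S F ?_ (fun p hp => hfresh p (List.mem_cons_of_mem _ hp)) hnd.2,
            ffiGo_cons, if_pos (by simpa using (hS kv.2).mp hc)]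
        intro w
        rw [List.mem_append, List.mem_singleton, ← hS w]
        exact ⟨Or.inl, fun h => h.elim id (fun e => e ▸ hc)⟩
      · rw [if_neg (by simpa using hc)]
        have hadd : ∀ w, w ∈ PySem.Set.add S kv.2 ↔ w ∈ seen ++ [kv.2] := by
          intro w
          rw [PySem.Set.mem_add, List.mem_append, List.mem_singleton, hS w]
        rw [ih (seen ++ [kv.2]) _ _ hadd ?_ hnd.2,
            PySem.Dict.items_insert_of_not_contains _ _ (hfresh kv List.mem_cons_self),
            ffiGo_cons, if_neg (by simp only [List.contains_iff_mem]; exact fun hm => hc ((hS kv.2).mpr hm))]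
        · simp
        · intro p hp
          rw [PySem.Dict.contains_insert]
          have h1 : F.contains p.1 = false := hfresh p (List.mem_cons_of_mem _ hp)
          have h2 : p.1 ≠ kv.1 := fun hh => hnd.1 (hh ▸ List.mem_map_of_mem hp)
          simp [h1, h2]

-- B-side: the reverse overwrite fold looks up the FIRST pair with a given value.
lemma revfold_get (l : List (String × String)) (d : PySem.Dict String String) (v : String) :
    (l.reverse.foldl (fun (d : PySem.Dict String String) kv => d.insert kv.2 kv.1) d).get? v
      = match l.find? (fun kv => kv.2 == v) with
        | some kv => some kv.1
        | none => d.get? v := by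
  induction l generalizing d with
  | nil => simp
  | cons kv t ih =>
      rw [List.reverse_cons, List.foldl_append]
      by_cases hv : v = kv.2
      · subst hv
        simp [PySem.Dict.get?_insert_self, List.find?_cons_of_pos]
      · rw [List.foldl_cons, List.foldl_nil,
            PySem.Dict.get?_insert_of_ne _ _ hv, ih d,
            List.find?_cons_of_neg (by simp [Ne.symm hv])]

-- B-side: filtering on "my key is the first key recorded for my value" is ffiGo.
lemma b_filter (full : List (String × String)) (hnd : (full.map Prod.fst).Nodup) :
    ∀ (t pre : List (String × String)), full = pre ++ t →
    t.filter (fun q => ((full.find? (fun r => r.2 == q.2)).map Prod.fst) == some q.1)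
      = ffiGo (pre.map Prod.snd) t := by
  intro t
  induction t with
  | nil => intro pre _; simp [ffiGo]
  | cons q t ih =>
      intro pre hfull
      have hrec := ih (pre ++ [q]) (by simp [hfull])
      simp only [List.map_append, List.map_cons, List.map_nil] at hrec
      rw [ffiGo_cons]
      by_cases hv : q.2 ∈ pre.map Prod.snd
      · -- an earlier pair already has this value: the first key is not q's key
        have hex : ∃ r, r ∈ pre ∧ (fun (r : String × String) => r.2 == q.2) r = true := by
          obtain ⟨r, hr, he⟩ := List.mem_map.mp hv
          exact ⟨r, hr, by simp [he]⟩
        obtain ⟨r, hfind⟩ := Option.isSome_iff_exists.mp (List.find?_isSome.mpr hex)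
        have hrmem : r ∈ pre := List.mem_of_find?_eq_some hfind
        have hrval : r.2 = q.2 := by simpa using List.find?_some hfind
        have hne : r.1 ≠ q.1 := by
          rw [hfull, List.map_append, List.nodup_append] at hnd
          intro he
          have h1 : r.1 ∈ pre.map Prod.fst := List.mem_map_of_mem hrmem
          have h2 : r.1 ∈ (q :: t).map Prod.fst :=
            he ▸ List.mem_map_of_mem List.mem_cons_self
          exact hnd.2.2 r.1 h1 r.1 h2 rfl
        rw [List.filter_cons_of_neg (by
              rw [hfull, List.find?_append, hfind]
              simp [hne]),
            if_pos (by simpa using hv), ← hrec]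
      · -- q is the first pair with this value
        have hnone : pre.find? (fun r => r.2 == q.2) = none := by
          rw [List.find?_eq_none]
          intro x hx
          simp only [beq_iff_eq]
          exact fun he => hv (he ▸ List.mem_map_of_mem hx)
        rw [List.filter_cons_of_pos (by
              rw [hfull, List.find?_append, hnone, Option.none_or,
                  List.find?_cons_of_pos (by simp)]
              simp),
            if_neg (by simpa using hv), ← hrec]

-- Folding key-fresh inserts of a nodup-keyed pair list into a dict appends the pairs.
lemma fold_insert_fresh (l : List (String × String)) (acc : PySem.Dict String String)
    (hfresh : ∀ p ∈ l, acc.contains p.1 = false) (hnd : (l.map Prod.fst).Nodup) :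
    (l.foldl (fun (d : PySem.Dict String String) kv => d.insert kv.1 kv.2) acc).items
      = acc.items ++ l := by
  induction l generalizing acc with
  | nil => simp
  | cons kv t ih =>
      simp only [List.map_cons, List.nodup_cons] at hnd
      simp only [List.foldl_cons]
      rw [ih]
      · rw [PySem.Dict.items_insert_of_not_contains _ _ (hfresh kv List.mem_cons_self)]
        simp
      · intro p hp
        rw [PySem.Dict.contains_insert]
        have h1 : acc.contains p.1 = false := hfresh p (List.mem_cons_of_mem _ hp)
        have h2 : p.1 ≠ kv.1 := fun hh => hnd.1 (hh ▸ List.mem_map_of_mem hp)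
        simp [h1, h2]
      · exact hnd.2

-- ===== VERDICT (by name: the statement is the Claim_ definition above) =====
theorem filter_first_instance_spec : Claim_equal_filter_first_instance := by
  intro input_dict _ hpre
  unfold Spec_filter_first_instance filter_first_instance filter_first_instance_alt
  rw [a_side input_dict [] PySem.Set.empty PySem.Dict.empty
        (by intro w; simp [PySem.Set.empty])
        (by intro p _; simp) hpre]
  show PySem.Dict.empty.items ++ ffiGo [] input_dict
      = ((input_dict.filter (fun kv =>
            (input_dict.reverse.foldl
              (fun (d : PySem.Dict String String) kv => d.insert kv.2 kv.1)
              PySem.Dict.empty).get? kv.2 == some kv.1)).foldl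
          (fun (d : PySem.Dict String String) kv => d.insert kv.1 kv.2)
          PySem.Dict.empty).items
  have hpred : input_dict.filter (fun kv =>
        (input_dict.reverse.foldl
          (fun (d : PySem.Dict String String) kv => d.insert kv.2 kv.1)
          PySem.Dict.empty).get? kv.2 == some kv.1)
      = input_dict.filter (fun q =>
          ((input_dict.find? (fun r => r.2 == q.2)).map Prod.fst) == some q.1) := by
    refine List.filter_congr (fun q _ => ?_)
    rw [revfold_get]
    cases h : input_dict.find? (fun r => r.2 == q.2) with
    | none => simp [PySem.Dict.get?_empty]
    | some kv => simp
  have hb := b_filter input_dict hpre input_dict [] (by simp)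
  simp only [List.map_nil] at hb
  rw [hpred, hb, fold_insert_fresh _ PySem.Dict.empty (by intro p _; simp)
        (hpre.sublist ((ffiGo_sublist [] input_dict).map Prod.fst))]
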